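-- pv_equiv track=rewrite | github.com/honeysuckcle/my-practice-of-leetcode | Weekly competition/333/3.py | squareFreeSubsets
-- ===== SOURCE A (Python) =====
-- from typing import List
--
-- def squareFreeSubsets(nums: List[int]) -> int:
--     n = len(nums)
--     def yinzi(num):
--         ans = []
--         for i in range(2, num+1):
--             if num % i == 0:
--                 ans.append(i)
--         return ans
--     yinzi_list = list(map(yinzi, nums))
--     def is_square(i):
--         for j in yinzi_list[i]:
--             if nums[i] % (j*j) == 0:
--                 return True
--         return False
--
--     def can_join(arr1, arr2):
--         for i in arr1:
--             if i in arr2: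
--                 return False
--         return True
--
--     def dfs(i, path, cnt):
--         if i == n:
--             if cnt == 0:
--                 return 0
--             return 1
--         else:
--             if is_square(i):
--                 return dfs(i+1, path, cnt)
--             elif can_join(yinzi_list[i], path):
--                 return dfs(i+1, set(list(path)+yinzi_list[i]), cnt+1) + dfs(i+1, path,cnt)
--             else:
--                 return dfs(i+1, path,cnt)
--     ans = dfs(0, set(), 0)
--     return ans
-- ===== SOURCE B (Python) =====
-- from typing import List
--
-- def squareFreeSubsets(nums: List[int]) -> int:
--     # Forward DP over canonical "used divisors" keys, merging equal states,
--     # instead of A's exponential DFS over all subsets.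
--     dp = {(): 1}  # key: sorted tuple of divisors (>1) used by chosen elements
--     for num in nums:
--         ds = [d for d in range(2, num + 1) if num % d == 0]
--         if any(num % (d * d) == 0 for d in ds):
--             continue  # not square-free: can never be chosen
--         add = []
--         for used, c in dp.items():
--             if not any(d in used for d in ds):
--                 add.append((tuple(sorted(set(used) | set(ds))), c))
--         for k, c in add:
--             dp[k] = dp.get(k, 0) + c
--     return sum(dp.values()) - 1
-- ===== Notes on version B (the rewrite author's own statement) =====
-- stated objective: faster
-- what changed: A's exponential depth-first recursion over all subset choices (carrying the set of used divisors down each branch) is replaced by a forward dynamic program over a dict keyed by the canonical sorted tuple of used divisors, which merges equal states instead of re-exploring them.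
import Mathlib
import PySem

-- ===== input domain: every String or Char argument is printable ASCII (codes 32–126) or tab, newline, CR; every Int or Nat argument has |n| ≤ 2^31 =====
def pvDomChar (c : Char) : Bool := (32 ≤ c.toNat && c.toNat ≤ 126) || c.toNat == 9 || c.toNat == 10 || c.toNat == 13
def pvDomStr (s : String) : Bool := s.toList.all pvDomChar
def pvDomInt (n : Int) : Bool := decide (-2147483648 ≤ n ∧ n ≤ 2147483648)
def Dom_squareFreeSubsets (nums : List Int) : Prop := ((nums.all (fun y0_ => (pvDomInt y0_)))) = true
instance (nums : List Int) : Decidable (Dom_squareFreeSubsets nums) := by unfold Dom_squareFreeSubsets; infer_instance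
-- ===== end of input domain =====

-- B replaces A's exponential DFS over subsets by a forward dict DP over canonical
-- "used divisors" keys that merges equal states; same return value everywhere.

-- ===== PORT A =====
-- yinzi(num): all divisors ≥ 2 of num, collected by an append loop over range(2, num+1)
def yinziA (num : Int) : List Int :=
  (PySem.List.pyRange 2 (num + 1) 1).foldl
    (fun ans i => if PySem.Int.mod num i == 0 then ans ++ [i] else ans) []

-- is_square(i): early-return loop "for j in yinzi_list[i]: if nums[i] % (j*j) == 0: return True"
def isSquareA (num : Int) (ys : List Int) : Bool :=
  ys.any (fun j => PySem.Int.mod num (j * j) == 0)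

-- can_join(arr1, arr2): early-return loop "for i in arr1: if i in arr2: return False"
def canJoinA (arr1 : List Int) (arr2 : PySem.Set Int) : Bool :=
  !arr1.any (fun i => PySem.Set.contains arr2 i)

-- dfs(i, path, cnt), recursing on the remaining (nums[i], yinzi_list[i]) pairs
def dfsA : List (Int × List Int) → PySem.Set Int → Int → Int
  | [], _, cnt => if cnt == 0 then 0 else 1
  | (num, ys) :: rest, path, cnt =>
    if isSquareA num ys then dfsA rest path cnt
    else if canJoinA ys path then
      dfsA rest (PySem.Set.ofList (path ++ ys)) (cnt + 1) + dfsA rest path cnt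
    else dfsA rest path cnt

def squareFreeSubsets (nums : List Int) : Int :=
  let yinziList := nums.map yinziA
  dfsA (nums.zip yinziList) PySem.Set.empty 0

-- ===== PORT B =====
-- [d for d in range(2, num+1) if num % d == 0]
def divsB (num : Int) : List Int :=
  (PySem.List.pyRange 2 (num + 1) 1).filter (fun d => PySem.Int.mod num d == 0)

-- one iteration of B's "for num in nums" loop over the dp dict
def stepB (dp : PySem.Dict (List Int) Int) (num : Int) : PySem.Dict (List Int) Int :=
  if (divsB num).any (fun d => PySem.Int.mod num (d * d) == 0) then dp
  else
    ((dp.items.filter (fun p => !((divsB num).any (fun d => p.1.contains d)))).map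
      (fun p => (PySem.List.sorted (PySem.Set.union (PySem.Set.ofList p.1) (divsB num)) (fun x => x) false, p.2))).foldl
      (fun d kc => d.insert kc.1 (d.getD kc.1 0 + kc.2)) dp

def squareFreeSubsets_alt (nums : List Int) : Int :=
  let dp := nums.foldl stepB (PySem.Dict.empty.insert ([] : List Int) 1)
  dp.values.sum - 1

-- ===== PRECONDITION & SPEC =====
def Spec_squareFreeSubsets (nums : List Int) (out : Int) : Prop := out = squareFreeSubsets_alt nums
instance (nums : List Int) (out : Int) : Decidable (Spec_squareFreeSubsets nums out) := by unfold Spec_squareFreeSubsets; infer_instance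

-- ===== CLAIM (what is proved, stated in full; the proofs are below) =====
def Claim_equal_squareFreeSubsets : Prop := ∀ (nums : List Int), Dom_squareFreeSubsets nums → Spec_squareFreeSubsets nums (squareFreeSubsets nums)

-- ===== LEMMAS AND PROOFS =====

-- the common mathematical count: number of valid selections (incl. the empty one)
-- from the remaining numbers, given the divisors already used
def G : List Int → List Int → Int
  | [], _ => 1
  | num :: l, path =>
    let ys := yinziA num
    if isSquareA num ys then G l path
    else if ys.any (fun d => path.contains d) then G l path
    else G l (path ++ ys) + G l path

theorem G_congr (l : List Int) (p₁ p₂ : List Int)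
    (h : ∀ x : Int, x ∈ p₁ ↔ x ∈ p₂) : G l p₁ = G l p₂ := by
  induction l generalizing p₁ p₂ with
  | nil => rfl
  | cons num t ih =>
    have hc : ∀ x : Int, p₁.contains x = p₂.contains x := by
      intro x; simp [List.contains_eq_mem, h x]
    simp only [G]
    rw [show ((yinziA num).any (fun d => p₁.contains d))
          = ((yinziA num).any (fun d => p₂.contains d)) from
        PySem.List.any_congr_mem (fun d _ => hc d)]
    split
    · exact ih p₁ p₂ h
    · split
      · exact ih p₁ p₂ h
      · have h2 : ∀ x : Int, x ∈ p₁ ++ yinziA num ↔ x ∈ p₂ ++ yinziA num := by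
          intro x; simp [h x]
        rw [ih p₁ p₂ h, ih (p₁ ++ yinziA num) (p₂ ++ yinziA num) h2]

theorem canJoin_eq (ys path : List Int) :
    canJoinA ys path = !(ys.any (fun d => path.contains d)) := rfl

theorem dfsA_eq_G (nums : List Int) : ∀ (path : PySem.Set Int) (cnt : Int), 0 ≤ cnt →
    dfsA (nums.map (fun n => (n, yinziA n))) path cnt
      = G nums path - (if cnt == 0 then 1 else 0) := by
  induction nums with
  | nil =>
    intro path cnt _
    simp only [List.map_nil, dfsA, G]
    split <;> simp
  | cons num t ih =>
    intro path cnt hcnt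
    simp only [List.map_cons, dfsA, G, canJoin_eq]
    cases hsq : isSquareA num (yinziA num) with
    | true =>
      rw [if_pos rfl]
      exact ih path cnt hcnt
    | false =>
      simp only [Bool.false_eq_true, if_false]
      by_cases hcj : ((yinziA num).any fun d => List.contains path d) = true
      · rw [if_neg (by simp only [hcj]; decide), if_pos hcj]
        exact ih path cnt hcnt
      · have hcj' := eq_false_of_ne_true hcj
        rw [if_pos (by simp only [hcj']; decide), if_neg hcj]
        rw [ih path cnt hcnt, ih _ (cnt + 1) (by omega),
          G_congr t _ _ (fun x => PySem.Set.mem_ofList ..)]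
        have hne : ((cnt + 1 : Int) == 0) = false := by
          simp only [beq_eq_false_iff_ne, ne_eq]; omega
        rw [hne]
        by_cases hc : cnt = 0
        · simp [hc]; ring
        · simp [hc]

-- A computes G nums [] - 1
theorem A_eq_G (nums : List Int) : squareFreeSubsets nums = G nums [] - 1 := by
  show dfsA (nums.zip (nums.map yinziA)) PySem.Set.empty 0 = G nums [] - 1
  rw [← List.map_prod_left_eq_zip]
  have := dfsA_eq_G nums PySem.Set.empty 0 le_rfl
  simpa using this

-- B-side: weighted sum of the continuation count over the dict entries
def SL (its : List (List Int × Int)) (l : List Int) : Int :=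
  (its.map (fun p => p.2 * G l p.1)).sum

-- replacing the unique entry with key k by (k, w + c) adds c * f k to the weighted sum
theorem sum_replace (f : List Int → Int) (k : List Int) (c : Int) :
    ∀ (its : List (List Int × Int)) (w : Int), (its.map Prod.fst).Nodup → (k, w) ∈ its →
    ((its.map (fun p => if p.1 == k then (k, w + c) else p)).map (fun p => p.2 * f p.1)).sum
      = (its.map (fun p => p.2 * f p.1)).sum + c * f k := by
  intro its
  induction its with
  | nil => intro w _ h; cases h
  | cons hd tl ih =>
    intro w hnd hmem
    simp only [List.map_cons, List.nodup_cons] at hnd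
    by_cases hk : hd.1 = k
    · have hnotin : k ∉ tl.map Prod.fst := hk ▸ hnd.1
      have hhd : hd = (k, w) := by
        rcases List.mem_cons.mp hmem with h | h
        · exact h.symm
        · exact absurd (List.mem_map_of_mem (f := Prod.fst) h) hnotin
      have htl : tl.map (fun p => if p.1 == k then (k, w + c) else p) = tl := by
        have hcong : ∀ p ∈ tl, (if p.1 == k then (k, w + c) else p) = p := by
          intro p hp
          rw [if_neg]
          simp only [beq_iff_eq]
          intro hpk
          exact hnotin (hpk ▸ List.mem_map_of_mem (f := Prod.fst) hp)
        rw [List.map_congr_left hcong]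
        simp
      simp only [List.map_cons, hhd, beq_self_eq_true, if_pos, List.sum_cons, htl]
      ring
    · have hbeq : (hd.1 == k) = false := by simp [hk]
      have hmem' : (k, w) ∈ tl := by
        rcases List.mem_cons.mp hmem with h | h
        · exact absurd (congrArg Prod.fst h.symm) hk
        · exact h
      simp only [List.map_cons, hbeq, Bool.false_eq_true, if_false, List.sum_cons,
        ih w hnd.2 hmem']
      ring

theorem sum_insert (d : PySem.Dict (List Int) Int) (hnd : d.keys.Nodup)
    (k : List Int) (c : Int) (f : List Int → Int) :
    ((d.insert k (d.getD k 0 + c)).items.map (fun p => p.2 * f p.1)).sum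
      = (d.items.map (fun p => p.2 * f p.1)).sum + c * f k := by
  by_cases hcon : d.contains k = true
  · obtain ⟨w, hw⟩ : ∃ w, d.get? k = some w := by
      rw [PySem.Dict.contains_eq_isSome_get?] at hcon
      exact Option.isSome_iff_exists.mp hcon
    have hmem : (k, w) ∈ d.items := PySem.Dict.mem_items_of_get?_eq_some d hw
    have hgd : d.getD k 0 = w := PySem.Dict.getD_of_get?_eq_some d 0 hw
    rw [hgd, PySem.Dict.items_insert_of_contains d (w + c) hcon]
    exact sum_replace f k c d.items w hnd hmem
  · have hcon' : d.contains k = false := eq_false_of_ne_true hcon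
    rw [PySem.Dict.getD_of_not_contains d 0 hcon',
      PySem.Dict.items_insert_of_not_contains d (0 + c) hcon']
    simp only [List.map_append, List.sum_append, List.map_cons, List.map_nil,
      List.sum_cons, List.sum_nil]
    ring

theorem sum_fold_add (l : List Int) :
    ∀ (add : List (List Int × Int)) (d : PySem.Dict (List Int) Int), d.keys.Nodup →
    SL ((add.foldl (fun d kc => d.insert kc.1 (d.getD kc.1 0 + kc.2)) d)).items l
      = SL d.items l + (add.map (fun kc => kc.2 * G l kc.1)).sum := by
  intro add
  induction add with
  | nil => intro d _; simp
  | cons kc tl ih =>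
    intro d hnd
    simp only [List.foldl_cons, List.map_cons, List.sum_cons]
    rw [ih _ (PySem.Dict.nodup_keys_insert d kc.1 _ hnd)]
    unfold SL
    rw [sum_insert d hnd kc.1 kc.2 (G l)]
    ring

theorem stepB_keys_nodup (dp : PySem.Dict (List Int) Int) (num : Int)
    (hnd : dp.keys.Nodup) : (stepB dp num).keys.Nodup := by
  unfold stepB
  split
  · exact hnd
  · exact PySem.Dict.nodup_keys_foldl_insert_key _ Prod.fst
      (fun d kc => d.getD kc.1 0 + kc.2) dp hnd

theorem yinzi_eq_divs (num : Int) : yinziA num = divsB num := by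
  unfold yinziA divsB
  rw [PySem.List.foldl_append_if_eq_filter]
  simp

theorem G_cons (num : Int) (l path : List Int) :
    G (num :: l) path
      = if isSquareA num (yinziA num) = true then G l path
        else if ((yinziA num).any fun d => List.contains path d) = true then G l path
        else G l (path ++ yinziA num) + G l path := rfl

theorem split_sum (q : List Int × Int → Bool) (f g : List Int → Int) :
    ∀ (its : List (List Int × Int)),
    (its.map (fun p => p.2 * (if q p = true then g p.1 else f p.1 + g p.1))).sum
      = (its.map (fun p => p.2 * g p.1)).sum
        + ((its.filter (fun p => !q p)).map (fun p => p.2 * f p.1)).sum := by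
  intro its
  induction its with
  | nil => simp
  | cons hd tl ih =>
    by_cases hq : q hd = true
    · simp only [List.map_cons, List.sum_cons, List.filter_cons, hq, if_pos,
        Bool.not_true, Bool.false_eq_true, if_false, ih]
      ring
    · have hq' := eq_false_of_ne_true hq
      simp only [List.map_cons, List.sum_cons, List.filter_cons, hq', Bool.false_eq_true,
        if_false, Bool.not_false, if_true, List.map_cons, List.sum_cons, ih]
      ring

theorem G_sorted_union (l p ds : List Int) :
    G l (PySem.List.sorted (PySem.Set.union (PySem.Set.ofList p) ds) (fun x => x) false)
      = G l (p ++ ds) := by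
  refine G_congr l _ _ (fun x => ?_)
  rw [List.Perm.mem_iff (PySem.List.sorted_perm _ _ _)]
  rw [PySem.Set.mem_union]
  simp [PySem.Set.mem_ofList]

theorem stepB_sum (dp : PySem.Dict (List Int) Int) (num : Int) (l : List Int)
    (hnd : dp.keys.Nodup) : SL (stepB dp num).items l = SL dp.items (num :: l) := by
  have hys : yinziA num = divsB num := yinzi_eq_divs num
  unfold stepB
  by_cases h : ((divsB num).any fun d => PySem.Int.mod num (d * d) == 0) = true
  · rw [if_pos h]
    unfold SL
    congr 1
    refine List.map_congr_left (fun p _ => ?_)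
    rw [G_cons, if_pos (show isSquareA num (yinziA num) = true by
      unfold isSquareA; rw [hys]; exact h)]
  · rw [if_neg h]
    rw [show SL ((((dp.items.filter
          (fun p => !((divsB num).any (fun d => p.1.contains d)))).map
          (fun p => (PySem.List.sorted (PySem.Set.union (PySem.Set.ofList p.1) (divsB num))
            (fun x => x) false, p.2))).foldl
          (fun d kc => d.insert kc.1 (d.getD kc.1 0 + kc.2)) dp)).items l
        = SL dp.items l + (((dp.items.filter
          (fun p => !((divsB num).any (fun d => p.1.contains d)))).map
          (fun p => (PySem.List.sorted (PySem.Set.union (PySem.Set.ofList p.1) (divsB num))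
            (fun x => x) false, p.2))).map (fun kc => kc.2 * G l kc.1)).sum
      from sum_fold_add l _ dp hnd]
    rw [List.map_map]
    have hsq : isSquareA num (yinziA num) = false := by
      unfold isSquareA; rw [hys]; exact eq_false_of_ne_true h
    have hrhs : SL dp.items (num :: l)
        = (dp.items.map (fun p => p.2 *
            (if ((divsB num).any fun d => List.contains p.1 d) = true then G l p.1
             else G l (p.1 ++ divsB num) + G l p.1))).sum := by
      unfold SL
      congr 1
      refine List.map_congr_left (fun p _ => ?_)
      rw [G_cons, if_neg (by rw [hsq]; exact Bool.false_ne_true), hys]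
    rw [hrhs, split_sum (fun p => ((divsB num).any fun d => List.contains p.1 d))
      (fun x => G l (x ++ divsB num)) (fun x => G l x) dp.items]
    congr 1
    refine congrArg List.sum (List.map_congr_left (fun p _ => ?_))
    simp only [Function.comp_apply, G_sorted_union]

theorem foldl_stepB_sum (nums : List Int) : ∀ (dp : PySem.Dict (List Int) Int), dp.keys.Nodup →
    SL (nums.foldl stepB dp).items [] = SL dp.items nums := by
  induction nums with
  | nil => intro dp _; rfl
  | cons num t ih =>
    intro dp hnd
    rw [List.foldl_cons, ih _ (stepB_keys_nodup dp num hnd), stepB_sum dp num t hnd]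

theorem B_eq_G (nums : List Int) : squareFreeSubsets_alt nums = G nums [] - 1 := by
  show (nums.foldl stepB (PySem.Dict.empty.insert ([] : List Int) 1)).values.sum - 1
    = G nums [] - 1
  have h0 : (PySem.Dict.empty.insert ([] : List Int) 1).keys.Nodup := by decide
  have hv : ∀ (d : PySem.Dict (List Int) Int), d.values.sum = SL d.items [] := by
    intro d
    unfold SL
    simp [PySem.Dict.values, G]
  rw [hv, foldl_stepB_sum nums _ h0]
  show (List.map (fun p => p.2 * G nums p.1) [(([] : List Int), (1 : Int))]).sum - 1
    = G nums [] - 1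
  simp

-- ===== VERDICT (by name: the statement is the Claim_ definition above) =====
theorem squareFreeSubsets_spec : Claim_equal_squareFreeSubsets := by
  intro nums _
  show squareFreeSubsets nums = squareFreeSubsets_alt nums
  rw [A_eq_G, B_eq_G]
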